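-- pv_equiv track=rewrite | github.com/aryansharma2k2/Recommender_System_For_Fish_Farmers | app.py | get_pond_dimensions
-- ===== SOURCE A (Python) =====
-- def get_pond_dimensions(num_ponds, pond_details):
--     number_of_ponds = num_ponds
--     total_volume = 0
--     total_surface_area = 0
--     surface_areas = []  # List to store surface area of each pond
--     pond_volumes = []   # List to store volume of each pond
--
--     for length, breadth, depth in pond_details:
--         volume = length * breadth * depth
--         surface_area = length * breadth
--
--         total_volume += volume
--         total_surface_area += surface_area
--         surface_areas.append(surface_area)  # Add surface area of this pond to the list
--         pond_volumes.append(volume)         # Add volume of this pond to the list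
--
--     return number_of_ponds, total_volume, total_surface_area, surface_areas, pond_volumes
-- ===== SOURCE B (Python) =====
-- def _dc(details, lo, hi):
--     # totals and per-pond lists for details[lo:hi], by divide and conquer
--     n = hi - lo
--     if n == 0:
--         return 0, 0, [], []
--     if n == 1:
--         length, breadth, depth = details[lo]
--         surface_area = length * breadth
--         volume = length * breadth * depth
--         return volume, surface_area, [surface_area], [volume]
--     mid = (lo + hi) // 2
--     v1, s1, a1, p1 = _dc(details, lo, mid)
--     v2, s2, a2, p2 = _dc(details, mid, hi)
--     return v1 + v2, s1 + s2, a1 + a2, p1 + p2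
--
-- def get_pond_dimensions(num_ponds, pond_details):
--     total_volume, total_surface_area, surface_areas, pond_volumes = \
--         _dc(pond_details, 0, len(pond_details))
--     return num_ponds, total_volume, total_surface_area, surface_areas, pond_volumes
-- ===== Notes on version B (the rewrite author's own statement) =====
-- stated objective: alternative
-- what changed: Replaces A's single fused left-to-right accumulator loop with a divide-and-conquer recursion: split the pond list at its midpoint, recursively compute totals and per-pond lists for each half, and combine by addition and concatenation (correct since + and list concatenation are associative).
import Mathlib
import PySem

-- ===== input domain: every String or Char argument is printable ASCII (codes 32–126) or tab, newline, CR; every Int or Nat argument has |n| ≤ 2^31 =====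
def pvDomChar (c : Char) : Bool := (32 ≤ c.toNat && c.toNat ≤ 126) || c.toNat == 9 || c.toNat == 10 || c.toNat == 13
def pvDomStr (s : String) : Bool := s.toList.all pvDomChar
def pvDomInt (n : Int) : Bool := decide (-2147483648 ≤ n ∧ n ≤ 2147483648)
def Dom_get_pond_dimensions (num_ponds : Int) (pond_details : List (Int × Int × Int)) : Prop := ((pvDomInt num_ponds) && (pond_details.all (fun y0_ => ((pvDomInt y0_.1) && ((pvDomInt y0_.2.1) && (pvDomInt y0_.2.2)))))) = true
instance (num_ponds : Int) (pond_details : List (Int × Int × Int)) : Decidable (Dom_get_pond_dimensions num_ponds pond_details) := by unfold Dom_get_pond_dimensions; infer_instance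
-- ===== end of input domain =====

-- B replaces A's fused accumulator loop with a midpoint divide-and-conquer recursion (alternative decomposition); return values are proved equal on all inputs.

-- ===== PORT A =====
-- A: one pass, four accumulators (total_volume, total_surface_area, surface_areas, pond_volumes)
def get_pond_dimensions (num_ponds : Int) (pond_details : List (Int × Int × Int)) : Int × Int × Int × List Int × List Int :=
  let st := pond_details.foldl
    (fun (st : Int × Int × List Int × List Int) lbd =>
      let (length, breadth, depth) := lbd
      let volume := length * breadth * depth
      let surface_area := length * breadth
      (st.1 + volume, st.2.1 + surface_area, st.2.2.1 ++ [surface_area], st.2.2.2 ++ [volume]))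
    (0, 0, [], [])
  (num_ponds, st.1, st.2.1, st.2.2.1, st.2.2.2)

-- ===== PORT B =====
-- B's helper _dc(details, lo, hi): Python indexes the slice [lo, hi) of the full list; the port
-- carries that slice as a list (mid = (lo+hi)//2 cuts it at half its length, exactly as in Python).
def pondDC (xs : List (Int × Int × Int)) : Int × Int × List Int × List Int :=
  match xs with
  | [] => (0, 0, [], [])
  | [(length, breadth, depth)] =>
      let surface_area := length * breadth
      let volume := length * breadth * depth
      (volume, surface_area, [surface_area], [volume])
  | x :: y :: rest =>
      let xs' := x :: y :: rest
      let mid := xs'.length / 2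
      let r1 := pondDC (xs'.take mid)
      let r2 := pondDC (xs'.drop mid)
      (r1.1 + r2.1, r1.2.1 + r2.2.1, r1.2.2.1 ++ r2.2.2.1, r1.2.2.2 ++ r2.2.2.2)
termination_by xs.length
decreasing_by
  · simp [List.length_take]; omega
  · simp [List.length_drop]; omega

def get_pond_dimensions_alt (num_ponds : Int) (pond_details : List (Int × Int × Int)) : Int × Int × Int × List Int × List Int :=
  let r := pondDC pond_details
  (num_ponds, r.1, r.2.1, r.2.2.1, r.2.2.2)

-- ===== PRECONDITION & SPEC =====
def Spec_get_pond_dimensions (num_ponds : Int) (pond_details : List (Int × Int × Int)) (out : Int × Int × Int × List Int × List Int) : Prop := out = get_pond_dimensions_alt num_ponds pond_details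
instance (num_ponds : Int) (pond_details : List (Int × Int × Int)) (out : Int × Int × Int × List Int × List Int) : Decidable (Spec_get_pond_dimensions num_ponds pond_details out) := by unfold Spec_get_pond_dimensions; infer_instance

-- ===== CLAIM (what is proved, stated in full; the proofs are below) =====
def Claim_equal_get_pond_dimensions : Prop := ∀ (num_ponds : Int) (pond_details : List (Int × Int × Int)), Dom_get_pond_dimensions num_ponds pond_details → Spec_get_pond_dimensions num_ponds pond_details (get_pond_dimensions num_ponds pond_details)

-- ===== LEMMAS AND PROOFS =====
-- closed characterisation of B's divide-and-conquer helper
theorem pondDC_char (xs : List (Int × Int × Int)) :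
    pondDC xs
    = ((xs.map (fun lbd => lbd.1 * lbd.2.1 * lbd.2.2)).sum,
       (xs.map (fun lbd => lbd.1 * lbd.2.1)).sum,
       xs.map (fun lbd => lbd.1 * lbd.2.1),
       xs.map (fun lbd => lbd.1 * lbd.2.1 * lbd.2.2)) := by
  fun_induction pondDC xs with
  | case1 => simp
  | case2 l b d => refine Prod.ext ?_ (Prod.ext ?_ (Prod.ext ?_ ?_)) <;> simp <;> rfl
  | case3 x y rest xs' mid r1 r2 ih1 ih2 =>
      have h : xs'.take mid ++ xs'.drop mid = x :: y :: rest := List.take_append_drop _ _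
      simp only [r1, r2, ih1, ih2, ← h, List.map_append, List.sum_append]

-- closed characterisation of A's accumulator loop
theorem pond_foldl_char (pond_details : List (Int × Int × Int))
    (tv tsa : Int) (sas pvs : List Int) :
    pond_details.foldl
      (fun (st : Int × Int × List Int × List Int) lbd =>
        let (length, breadth, depth) := lbd
        let volume := length * breadth * depth
        let surface_area := length * breadth
        (st.1 + volume, st.2.1 + surface_area, st.2.2.1 ++ [surface_area], st.2.2.2 ++ [volume]))
      (tv, tsa, sas, pvs)
    = (tv + (pond_details.map (fun lbd => lbd.1 * lbd.2.1 * lbd.2.2)).sum,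
       tsa + (pond_details.map (fun lbd => lbd.1 * lbd.2.1)).sum,
       sas ++ pond_details.map (fun lbd => lbd.1 * lbd.2.1),
       pvs ++ pond_details.map (fun lbd => lbd.1 * lbd.2.1 * lbd.2.2)) := by
  induction pond_details generalizing tv tsa sas pvs with
  | nil => simp
  | cons hd tl ih =>
    obtain ⟨l, b, d⟩ := hd
    simp [List.foldl_cons, ih, List.append_assoc, add_assoc]

-- ===== VERDICT (by name: the statement is the Claim_ definition above) =====
theorem get_pond_dimensions_spec : Claim_equal_get_pond_dimensions := by
  intro num_ponds pond_details _
  unfold Spec_get_pond_dimensions get_pond_dimensions get_pond_dimensions_alt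
  simp [pond_foldl_char, pondDC_char]
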